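-- pv_equiv track=rewrite | github.com/dcs-chalmers/dataloc_vn | churn.py | compute_active_periods
-- ===== SOURCE A (Python) =====
-- def compute_active_periods(trace, delta=5):
--     active_periods = []
--     if trace: # some traces are empty looks like it...
--         start_ts = last_ts = trace[0][0]
--         for x in trace:
--             t = x[0]
--             if t <= last_ts + delta:
--                 last_ts = t
--             else:
--                 if last_ts > start_ts:
--                     active_periods.append((start_ts, last_ts))
--                 start_ts = last_ts = t
--     return active_periods
-- ===== SOURCE B (Python) =====
-- def compute_active_periods(trace, delta=5):
--     segments = []
--     for x in trace:
--         t = x[0]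
--         if segments and t <= segments[-1][-1] + delta:
--             segments[-1].append(t)
--         else:
--             segments.append([t])
--     return [(seg[0], seg[-1]) for seg in segments[:-1] if seg[-1] > seg[0]]
-- ===== Notes on version B (the rewrite author's own statement) =====
-- stated objective: alternative
-- what changed: B materialises the gap-separated segments as lists of timestamps in one grouping pass and then emits (first, last) of every segment except the final one in a separate comprehension, instead of A's streaming start_ts/last_ts state machine with inline emission.
import Mathlib
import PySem

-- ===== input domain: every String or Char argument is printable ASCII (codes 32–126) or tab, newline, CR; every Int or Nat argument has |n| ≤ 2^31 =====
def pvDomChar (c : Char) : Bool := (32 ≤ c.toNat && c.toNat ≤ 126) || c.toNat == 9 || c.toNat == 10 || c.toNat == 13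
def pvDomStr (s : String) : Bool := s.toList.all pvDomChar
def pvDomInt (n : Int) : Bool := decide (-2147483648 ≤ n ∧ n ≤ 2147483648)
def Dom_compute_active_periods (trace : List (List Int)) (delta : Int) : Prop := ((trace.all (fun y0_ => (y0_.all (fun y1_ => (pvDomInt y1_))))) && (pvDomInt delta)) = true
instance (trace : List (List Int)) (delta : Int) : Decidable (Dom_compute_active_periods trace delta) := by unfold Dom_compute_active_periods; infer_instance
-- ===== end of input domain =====

-- B materialises the segments (lists of timestamps) in one pass and emits the (first, last)
-- pairs of all but the final segment in a separate comprehension-style pass, instead of A's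
-- streaming start/last state machine; objective: alternative decomposition, not faster.

-- ===== PORT A =====
-- one loop step of A on the timestamp t already read: state is (active_periods, start_ts, last_ts)
def capStepA' (delta : Int) (st : List (Int × Int) × Int × Int) (t : Int) :
    List (Int × Int) × Int × Int :=
  if t ≤ st.2.2 + delta then (st.1, st.2.1, t)
  else ((if st.2.2 > st.2.1 then st.1 ++ [(st.2.1, st.2.2)] else st.1), t, t)

-- one loop step of A: t = x[0]
def capStepA (delta : Int) (st : List (Int × Int) × Int × Int) (x : List Int) :
    List (Int × Int) × Int × Int :=
  capStepA' delta st ((PySem.List.pyGet? x 0).getD 0)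

def compute_active_periods (trace : List (List Int)) (delta : Int) : List (Int × Int) :=
  match trace with
  | [] => []
  | x0 :: _ =>
    let s0 := (PySem.List.pyGet? x0 0).getD 0
    (trace.foldl (capStepA delta) ([], s0, s0)).1

-- ===== PORT B =====
-- one loop step of B on the timestamp t already read: extend the last segment or open a new one
def capStepB' (delta : Int) (segs : List (List Int)) (t : Int) : List (List Int) :=
  if segs ≠ [] ∧ t ≤ ((PySem.List.pyGet? ((PySem.List.pyGet? segs (-1)).getD []) (-1)).getD 0) + delta
  then segs.dropLast ++ [((PySem.List.pyGet? segs (-1)).getD []) ++ [t]]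
  else segs ++ [[t]]

-- one loop step of B: t = x[0]
def capStepB (delta : Int) (segs : List (List Int)) (x : List Int) : List (List Int) :=
  capStepB' delta segs ((PySem.List.pyGet? x 0).getD 0)

def compute_active_periods_alt (trace : List (List Int)) (delta : Int) : List (Int × Int) :=
  let segs := trace.foldl (capStepB delta) []
  (segs.dropLast.filter
      (fun seg => (PySem.List.pyGet? seg (-1)).getD 0 > (PySem.List.pyGet? seg 0).getD 0)).map
    (fun seg => ((PySem.List.pyGet? seg 0).getD 0, (PySem.List.pyGet? seg (-1)).getD 0))

-- ===== PRECONDITION & SPEC =====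
-- Pre_ excludes traces containing an empty row, on which Python A (trace[0][0] / x[0]) raises IndexError.
def Pre_compute_active_periods (trace : List (List Int)) (delta : Int) : Prop :=
  ∀ x ∈ trace, x ≠ []
instance (trace : List (List Int)) (delta : Int) : Decidable (Pre_compute_active_periods trace delta) := by unfold Pre_compute_active_periods; infer_instance
def pvWitness_compute_active_periods : List (List Int) × Int := ([[0], [1], [20], [22], [100]], 5)

def Spec_compute_active_periods (trace : List (List Int)) (delta : Int) (out : List (Int × Int)) : Prop := out = compute_active_periods_alt trace delta
instance (trace : List (List Int)) (delta : Int) (out : List (Int × Int)) : Decidable (Spec_compute_active_periods trace delta out) := by unfold Spec_compute_active_periods; infer_instance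

-- ===== CLAIM (what is proved, stated in full; the proofs are below) =====
def Claim_equal_compute_active_periods : Prop := ∀ (trace : List (List Int)) (delta : Int), Dom_compute_active_periods trace delta → Pre_compute_active_periods trace delta → Spec_compute_active_periods trace delta (compute_active_periods trace delta)

-- ===== LEMMAS AND PROOFS =====

-- the timestamp a step reads from a row
def tOf (x : List Int) : Int := (PySem.List.pyGet? x 0).getD 0

-- pure version of A's remaining loop: current (start, last) state, emit at breaks
def goA (delta s l : Int) : List Int → List (Int × Int)
  | [] => []
  | t :: ts => if t ≤ l + delta then goA delta s t ts
               else (if l > s then [(s, l)] else []) ++ goA delta t t ts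

-- pure version of B's segment building: current segment, returns all segments (last included)
def segList (delta : Int) (cur : List Int) : List Int → List (List Int)
  | [] => [cur]
  | t :: ts => if t ≤ cur.getLastD 0 + delta then segList delta (cur ++ [t]) ts
               else cur :: segList delta [t] ts

theorem segList_ne_nil (delta : Int) (cur : List Int) (ts : List Int) :
    segList delta cur ts ≠ [] := by
  induction ts generalizing cur with
  | nil => simp [segList]
  | cons t ts ih =>
    simp only [segList]
    split
    · exact ih _
    · simp

theorem foldA_eq (delta : Int) (ts : List Int) :
    ∀ (acc : List (Int × Int)) (s l : Int),
      (ts.foldl (capStepA' delta) (acc, s, l)).1 = acc ++ goA delta s l ts := by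
  induction ts with
  | nil => intro acc s l; simp [goA]
  | cons t ts ih =>
    intro acc s l
    simp only [List.foldl_cons, goA, capStepA']
    by_cases h : t ≤ l + delta
    · simp [h, ih]
    · by_cases h2 : l > s <;> simp [h, h2, ih]

theorem pyLast_eq (cur : List Int) (hcur : cur ≠ []) :
    (PySem.List.pyGet? cur (-1)).getD 0 = cur.getLastD 0 := by
  rw [PySem.List.pyGet?_neg_one]
  cases cur with
  | nil => simp at hcur
  | cons a as => simp [List.getLastD_eq_getLast?]

theorem foldB_eq (delta : Int) (ts : List Int) :
    ∀ (segs0 : List (List Int)) (cur : List Int), cur ≠ [] →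
      (ts.foldl (capStepB' delta) (segs0 ++ [cur])) = segs0 ++ segList delta cur ts := by
  induction ts with
  | nil => intro segs0 cur _; simp [segList]
  | cons t ts ih =>
    intro segs0 cur hcur
    simp only [List.foldl_cons, segList]
    have hlast : (PySem.List.pyGet? (segs0 ++ [cur]) (-1)).getD [] = cur := by
      rw [PySem.List.pyGet?_neg_one_append_singleton]; rfl
    by_cases h : t ≤ cur.getLastD 0 + delta
    · have hs : capStepB' delta (segs0 ++ [cur]) t = segs0 ++ [cur ++ [t]] := by
        simp only [capStepB']
        rw [if_pos]
        · rw [hlast, List.dropLast_concat]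
        · exact ⟨by simp, by rw [hlast, pyLast_eq cur hcur]; exact h⟩
      rw [hs, if_pos h, ih _ _ (by simp)]
    · have hs : capStepB' delta (segs0 ++ [cur]) t = (segs0 ++ [cur]) ++ [[t]] := by
        simp only [capStepB']
        rw [if_neg]
        intro hc
        rw [hlast, pyLast_eq cur hcur] at hc
        exact h hc.2
      rw [hs, if_neg h]
      simpa using ih (segs0 ++ [cur]) [t] (by simp)

theorem segList_emit (delta : Int) (ts : List Int) :
    ∀ (cur : List Int), cur ≠ [] →
      ((segList delta cur ts).dropLast.filter
          (fun seg => (PySem.List.pyGet? seg (-1)).getD 0 > (PySem.List.pyGet? seg 0).getD 0)).map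
        (fun seg => ((PySem.List.pyGet? seg 0).getD 0, (PySem.List.pyGet? seg (-1)).getD 0))
      = goA delta (cur.headD 0) (cur.getLastD 0) ts := by
  induction ts with
  | nil => intro cur _; simp [segList, goA]
  | cons t ts ih =>
    intro cur hcur
    simp only [segList, goA]
    by_cases h : t ≤ cur.getLastD 0 + delta
    · rw [if_pos h, if_pos h, ih (cur ++ [t]) (by simp)]
      have h1 : (cur ++ [t]).headD 0 = cur.headD 0 := by
        cases cur with
        | nil => simp at hcur
        | cons a as => simp
      rw [h1, List.getLastD_concat]
    · rw [if_neg h, if_neg h]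
      have hhead : (PySem.List.pyGet? cur 0).getD 0 = cur.headD 0 := by
        cases cur with
        | nil => simp at hcur
        | cons a as => simp
      have hlastc := pyLast_eq cur hcur
      rw [List.dropLast_cons_of_ne_nil (segList_ne_nil delta [t] ts)]
      simp only [List.filter_cons]
      by_cases h2 : cur.getLastD 0 > cur.headD 0
      · rw [if_pos (by simp only [hhead, hlastc, decide_eq_true_eq]; exact h2), List.map_cons, ih [t] (by simp), if_pos h2]
        simp [hhead, hlastc]
      · rw [if_neg (by simp only [hhead, hlastc, decide_eq_true_eq]; omega), ih [t] (by simp), if_neg h2]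
        simp

-- ===== VERDICT (by name: the statement is the Claim_ definition above) =====
theorem compute_active_periods_spec : Claim_equal_compute_active_periods := by
  intro trace delta _ _
  unfold Spec_compute_active_periods
  cases trace with
  | nil => rfl
  | cons x0 rest =>
    unfold compute_active_periods compute_active_periods_alt
    simp only
    set t0 := (PySem.List.pyGet? x0 0).getD 0 with ht0
    -- A side: first iteration leaves the state at ([], t0, t0)
    have hA1 : capStepA delta ([], t0, t0) x0 = ([], t0, t0) := by
      simp only [capStepA, capStepA', ← ht0]
      by_cases h : t0 ≤ t0 + delta
      · simp [h]
      · simp [h]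
    have hA : ((x0 :: rest).foldl (capStepA delta) ([], t0, t0)).1
        = goA delta t0 t0 (rest.map tOf) := by
      rw [List.foldl_cons, hA1]
      have : rest.foldl (capStepA delta) ([], t0, t0)
          = (rest.map tOf).foldl (capStepA' delta) ([], t0, t0) := by
        rw [List.foldl_map]; rfl
      rw [this, foldA_eq]
      simp
    -- B side: first iteration opens the segment [t0]
    have hB1 : capStepB delta [] x0 = [[t0]] := by
      simp [capStepB, capStepB', ← ht0]
    have hB : (x0 :: rest).foldl (capStepB delta) []
        = [] ++ segList delta [t0] (rest.map tOf) := by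
      rw [List.foldl_cons, hB1]
      have : rest.foldl (capStepB delta) [[t0]]
          = (rest.map tOf).foldl (capStepB' delta) ([] ++ [[t0]]) := by
        rw [List.foldl_map]; rfl
      rw [this, foldB_eq delta (rest.map tOf) [] [t0] (by simp)]
    rw [hA, hB]
    have := segList_emit delta (rest.map tOf) [t0] (by simp)
    simp only [List.nil_append]
    rw [this]
    simp
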